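-- pv_equiv track=rewrite | github.com/MrBrantCode/unitest_baseline | mut_generate/mist_train_taco/taco_7134/solution.py | count_palindromic_anagrams
-- ===== SOURCE A (Python) =====
-- import collections
-- from math import factorial
--
-- def count_palindromic_anagrams(s: str) -> int:
--     # Count the frequency of each character in the string
--     char_count = collections.Counter(s)
--
--     # Count the number of characters with odd frequencies
--     odd_count = 0
--     for count in char_count.values():
--         if count % 2 != 0:
--             odd_count += 1
--             if odd_count > 1:
--                 return 0  # More than one character with odd frequency means no palindromic anagram
--
--     # Reduce the count of characters by 1 if they have odd frequency
--     for char in char_count: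
--         if char_count[char] % 2 != 0:
--             char_count[char] -= 1
--
--     # Calculate the number of palindromic anagrams
--     half_length = len(s) // 2
--     permutations = factorial(half_length)
--
--     for count in char_count.values():
--         permutations //= factorial(count // 2)
--
--     return permutations
-- ===== SOURCE B (Python) =====
-- import collections
--
--
-- def _is_prime(p: int) -> bool:
--     # trial division up to sqrt(p); only called with p >= 2
--     d = 2
--     while d * d <= p:
--         if p % d == 0:
--             return False
--         d += 1
--     return True
--
--
-- def _legendre(m: int, p: int) -> int:
--     # exponent of the prime p in m! (Legendre's formula)
--     e = 0
--     q = p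
--     while q <= m:
--         e += m // q
--         q *= p
--     return e
--
--
-- def count_palindromic_anagrams(s: str) -> int:
--     counts = collections.Counter(s)
--     if sum(c % 2 for c in counts.values()) > 1:
--         return 0
--     halves = [c // 2 for c in counts.values()]
--     n = len(s) // 2
--     result = 1
--     for p in range(2, n + 1):
--         if _is_prime(p):
--             e = _legendre(n, p)
--             for h in halves:
--                 e -= _legendre(h, p)
--             result *= p ** e
--     return result
-- ===== Notes on version B (the rewrite author's own statement) =====
-- stated objective: alternative
-- what changed: Replaces A's factorial-and-division multinomial (factorial(half) divided successively by factorial(count//2) after a dict-decrement pass) with a prime-factorization algorithm: for each prime p up to half (found by trial division) it computes the exponent of p in the answer by Legendre's formula applied to half and to each count//2, and multiplies the prime powers together; no factorials are ever formed.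
import Mathlib
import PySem

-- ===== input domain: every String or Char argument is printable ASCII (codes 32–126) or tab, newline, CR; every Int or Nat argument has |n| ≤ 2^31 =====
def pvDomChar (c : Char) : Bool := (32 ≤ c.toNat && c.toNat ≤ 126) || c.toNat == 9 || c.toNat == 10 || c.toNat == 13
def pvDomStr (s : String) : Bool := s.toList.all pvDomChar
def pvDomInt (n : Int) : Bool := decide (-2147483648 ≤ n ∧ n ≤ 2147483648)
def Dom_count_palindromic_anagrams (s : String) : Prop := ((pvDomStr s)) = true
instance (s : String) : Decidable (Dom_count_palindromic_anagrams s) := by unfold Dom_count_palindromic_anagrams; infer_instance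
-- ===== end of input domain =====

-- B computes the answer by prime factorization (trial-division primes up to half, Legendre's
-- formula for each exponent) instead of A's factorial construction and divisions
-- (objective: alternative algorithm, similar cost).

-- ===== PORT A =====

-- math.factorial; exact for the nonnegative arguments that occur in port A
def pyFactorial (n : Int) : Int := (Nat.factorial n.toNat : Int)

-- A's first loop: iterates the counter values keeping odd_count, returning 0 early when it exceeds 1
def aOddLoop : List Int → Int → Option Int
  | [], _ => none
  | c :: rest, odd =>
    if PySem.Int.mod c 2 ≠ 0 then
      if odd + 1 > 1 then some 0 else aOddLoop rest (odd + 1)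
    else aOddLoop rest odd

def count_palindromic_anagrams (s : String) : Int :=
  let char_count := PySem.Dict.counter s.toList
  match aOddLoop char_count.values 0 with
  | some r => r
  | none =>
    -- 'for char in char_count: if char_count[char] % 2 != 0: char_count[char] -= 1'
    let cc2 := char_count.keys.foldl
      (fun d ch => if PySem.Int.mod (d.getD ch 0) 2 ≠ 0 then d.modify ch 0 (fun v => v - 1) else d)
      char_count
    let half_length := PySem.Int.floordiv (PySem.Str.len s) 2
    let permutations := pyFactorial half_length
    cc2.values.foldl (fun p c => PySem.Int.floordiv p (pyFactorial (PySem.Int.floordiv c 2))) permutations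

-- ===== PORT B =====

-- B's _is_prime while loop 'while d*d <= p: …; d += 1'; the fuel p.toNat exceeds the
-- number of iterations (d starts at 2 and stops past sqrt p), so it never runs out
def bTrialLoop (p : Int) : Nat → Int → Bool
  | 0, _ => true
  | fuel+1, d =>
    if d * d ≤ p then (if PySem.Int.mod p d = 0 then false else bTrialLoop p fuel (d + 1))
    else true

def bIsPrime (p : Int) : Bool := bTrialLoop p p.toNat 2

-- B's _legendre while loop 'while q <= m: e += m//q; q *= p'; the fuel m.toNat exceeds the
-- number of iterations (q = p^k ≥ 2^k grows past m), so it never runs out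
def bLegLoop (m p : Int) : Nat → Int → Int → Int
  | 0, e, _ => e
  | fuel+1, e, q => if q ≤ m then bLegLoop m p fuel (e + PySem.Int.floordiv m q) (q * p) else e

def bLegendre (m p : Int) : Int := bLegLoop m p m.toNat 0 p

-- 'p ** e' ported as '^ e.toNat'; exact because the Legendre exponent e is provably ≥ 0
def count_palindromic_anagrams_alt (s : String) : Int :=
  let counts := PySem.Dict.counter s.toList
  if ((counts.values.map (fun c => PySem.Int.mod c 2)).sum) > 1 then 0
  else
    let halves := counts.values.map (fun c => PySem.Int.floordiv c 2)
    let n := PySem.Int.floordiv (PySem.Str.len s) 2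
    (PySem.List.pyRange 2 (n + 1) 1).foldl
      (fun result p =>
        if bIsPrime p then
          result * p ^ ((halves.foldl (fun e h => e - bLegendre h p) (bLegendre n p)).toNat)
        else result) 1

-- ===== PRECONDITION & SPEC =====
def Spec_count_palindromic_anagrams (s : String) (out : Int) : Prop := out = count_palindromic_anagrams_alt s
instance (s : String) (out : Int) : Decidable (Spec_count_palindromic_anagrams s out) := by unfold Spec_count_palindromic_anagrams; infer_instance

-- ===== CLAIM (what is proved, stated in full; the proofs are below) =====
def Claim_equal_count_palindromic_anagrams : Prop := ∀ (s : String), Dom_count_palindromic_anagrams s → Spec_count_palindromic_anagrams s (count_palindromic_anagrams s)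

-- ===== LEMMAS AND PROOFS =====

-- ---- pure Nat-level facts ----

def prodFact (hs : List Nat) : Nat := (hs.map Nat.factorial).prod

theorem prodFact_pos (hs : List Nat) : 0 < prodFact hs := by
  refine List.prod_pos ?_
  intro x hx
  simp only [List.mem_map] at hx
  obtain ⟨a, -, rfl⟩ := hx
  exact a.factorial_pos

-- A's division fold, at Nat level: dividing m * K! by each h! in turn is exact while Σh ≤ K
theorem afold_mul_prodFact : ∀ (hs : List Nat) (m K : Nat), hs.sum ≤ K →
    (hs.foldl (fun p h => p / h.factorial) (m * K.factorial)) * prodFact hs = m * K.factorial := by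
  intro hs
  induction hs with
  | nil => intro m K _; simp [prodFact]
  | cons h t ih =>
    intro m K hsum
    have hhK : h ≤ K := by
      have := t.sum ; simp [List.sum_cons] at hsum ; omega
    have hfac : m * K.factorial = (m * K.choose h * (K - h).factorial) * h.factorial := by
      have := Nat.choose_mul_factorial_mul_factorial hhK
      calc m * K.factorial = m * (K.choose h * h.factorial * (K - h).factorial) := by rw [this]
        _ = (m * K.choose h * (K - h).factorial) * h.factorial := by ring
    have hdiv : (m * K.factorial) / h.factorial = m * K.choose h * (K - h).factorial := by
      rw [hfac, Nat.mul_div_cancel _ h.factorial_pos]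
    have htK : t.sum ≤ K - h := by simp [List.sum_cons] at hsum; omega
    have := ih (m * K.choose h) (K - h) htK
    calc ((h :: t).foldl (fun p h => p / h.factorial) (m * K.factorial)) * prodFact (h :: t)
        = (t.foldl (fun p h => p / h.factorial) ((m * K.choose h) * (K - h).factorial)) * (h.factorial * prodFact t) := by
          simp [List.foldl_cons, hdiv, prodFact, List.map_cons, List.prod_cons]
      _ = ((t.foldl (fun p h => p / h.factorial) ((m * K.choose h) * (K - h).factorial)) * prodFact t) * h.factorial := by ring
      _ = (m * K.choose h * (K - h).factorial) * h.factorial := by rw [this]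
      _ = m * K.factorial := hfac.symm

-- halves and parities
theorem sum_halves (l : List Nat) : 2 * (l.map (fun c => c / 2)).sum + (l.map (fun c => c % 2)).sum = l.sum := by
  induction l with
  | nil => simp
  | cons h t ih => simp [List.sum_cons] ; omega

-- ---- trial-division primality ----

theorem bTrialLoop_iff (p : Nat) (hp : 2 ≤ p) :
    ∀ (fuel d : Nat), 2 ≤ d → p.sqrt + 1 ≤ d + fuel →
      (bTrialLoop (p : Int) fuel (d : Int) = true ↔ ∀ m : Nat, d ≤ m → m * m ≤ p → ¬ m ∣ p) := by
  intro fuel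
  induction fuel with
  | zero =>
    intro d _ hfuel
    simp only [bTrialLoop, true_iff]
    intro m hdm hmm hdvd
    have h1 : p.sqrt < d := by omega
    have h2 : m ≤ p.sqrt := Nat.le_sqrt.mpr hmm
    omega
  | succ fuel ih =>
    intro d hd hfuel
    by_cases hdd : d * d ≤ p
    · have hddI : ((d : Int) * (d : Int) ≤ (p : Int)) := by exact_mod_cast hdd
      rw [bTrialLoop, if_pos hddI]
      have hmodI : PySem.Int.mod (p : Int) (d : Int) = (((p % d : Nat) : Int)) := by
        exact_mod_cast PySem.Int.mod_natCast p d
      by_cases hmod : p % d = 0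
      · have hdvd : d ∣ p := Nat.dvd_of_mod_eq_zero hmod
        rw [if_pos (by rw [hmodI, hmod]; rfl)]
        constructor
        · intro h; exact absurd h (by simp)
        · intro h; exact absurd hdvd (h d le_rfl hdd)
      · have hnd : ¬ d ∣ p := fun hdvd => hmod (Nat.eq_zero_of_dvd_of_lt hdvd |> fun _ => Nat.mod_eq_zero_of_dvd hdvd)
        rw [if_neg (by rw [hmodI]; exact_mod_cast fun h => hmod (by exact_mod_cast h))]
        have hcast : ((d : Int) + 1) = (((d + 1 : Nat)) : Int) := by push_cast; ring
        rw [hcast, ih (d + 1) (by omega) (by omega)]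
        constructor
        · intro h m hdm hmm hdvd
          rcases Nat.eq_or_lt_of_le hdm with rfl | hlt
          · exact hnd hdvd
          · exact h m hlt hmm hdvd
        · intro h m hdm hmm hdvd
          exact h m (by omega) hmm hdvd
    · have hddI : ¬ ((d : Int) * (d : Int) ≤ (p : Int)) := by exact_mod_cast hdd
      rw [bTrialLoop, if_neg hddI]
      simp only [true_iff]
      intro m hdm hmm _
      exact hdd (le_trans (Nat.mul_le_mul hdm hdm) hmm)

theorem bIsPrime_iff (p : Nat) (hp : 2 ≤ p) : (bIsPrime (p : Int) = true ↔ p.Prime) := by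
  unfold bIsPrime
  rw [Int.toNat_natCast]
  rw [show ((2 : Int)) = ((2 : Nat) : Int) by norm_num]
  rw [bTrialLoop_iff p hp p 2 le_rfl (by have := Nat.sqrt_le_self p; omega)]
  rw [Nat.prime_def_le_sqrt]
  constructor
  · intro h
    exact ⟨hp, fun m h2m hms => h m h2m (Nat.le_sqrt.mp hms)⟩
  · intro ⟨_, h⟩ m h2m hmm
    exact h m h2m (Nat.le_sqrt.mpr hmm)

-- ---- Legendre's formula ----

theorem bLegLoop_eq (m p : Nat) (hp : 2 ≤ p) :
    ∀ (fuel k : Nat) (e : Int), m < p ^ (k + fuel) →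
      bLegLoop (m : Int) (p : Int) fuel e (((p ^ k : Nat)) : Int)
        = e + ((∑ i ∈ Finset.Ico k (k + fuel), m / p ^ i : Nat) : Int) := by
  intro fuel
  induction fuel with
  | zero => intro k e _; simp [bLegLoop]
  | succ fuel ih =>
    intro k e hlt
    by_cases hq : p ^ k ≤ m
    · have hqI : (((p ^ k : Nat)) : Int) ≤ (m : Int) := by exact_mod_cast hq
      rw [bLegLoop, if_pos hqI]
      have hdiv : PySem.Int.floordiv (m : Int) (((p ^ k : Nat)) : Int) = ((m / p ^ k : Nat) : Int) := by
        exact_mod_cast PySem.Int.floordiv_natCast m (p ^ k)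
      have hmul : (((p ^ k : Nat)) : Int) * (p : Int) = (((p ^ (k + 1) : Nat)) : Int) := by
        push_cast; ring
      rw [hdiv, hmul, ih (k + 1) (e + ((m / p ^ k : Nat) : Int)) (by rw [show k + 1 + fuel = k + (fuel + 1) by omega]; exact hlt)]
      have hsum : (∑ i ∈ Finset.Ico k (k + (fuel + 1)), m / p ^ i)
          = m / p ^ k + ∑ i ∈ Finset.Ico (k + 1) (k + 1 + fuel), m / p ^ i := by
        rw [show k + (fuel + 1) = k + 1 + fuel by omega]
        exact Finset.sum_eq_sum_Ico_succ_bot (by omega) _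
      rw [hsum]
      push_cast
      ring
    · have hqI : ¬ ((((p ^ k : Nat)) : Int) ≤ (m : Int)) := by exact_mod_cast hq
      rw [bLegLoop, if_neg hqI]
      have hzero : (∑ i ∈ Finset.Ico k (k + (fuel + 1)), m / p ^ i) = 0 := by
        refine Finset.sum_eq_zero ?_
        intro i hi
        have hki : k ≤ i := (Finset.mem_Ico.mp hi).1
        have : p ^ k ≤ p ^ i := Nat.pow_le_pow_right (by omega) hki
        exact Nat.div_eq_of_lt (by omega)
      rw [hzero]
      simp

theorem bLegendre_eq (m p : Nat) (hp : p.Prime) :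
    bLegendre (m : Int) (p : Int) = (((Nat.factorial m).factorization p : Nat) : Int) := by
  unfold bLegendre
  rw [Int.toNat_natCast]
  have hp2 : 2 ≤ p := hp.two_le
  have hlt : m < p ^ (1 + m) := by
    calc m < 2 ^ m := Nat.lt_two_pow_self
      _ ≤ 2 ^ (1 + m) := Nat.pow_le_pow_right (by omega) (by omega)
      _ ≤ p ^ (1 + m) := Nat.pow_le_pow_left hp2 _
  have hloop := bLegLoop_eq m p hp2 m 1 0 hlt
  rw [pow_one] at hloop
  rw [hloop, Nat.factorization_factorial hp (n := m) (b := 1 + m) (by have := Nat.log_le_self p m; omega)]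
  simp

-- ---- factorization of the product of factorials ----

theorem prodFact_factorization (hs : List Nat) (p : Nat) :
    (prodFact hs).factorization p = (hs.map (fun h => (Nat.factorial h).factorization p)).sum := by
  induction hs with
  | nil => simp [prodFact]
  | cons h t ih =>
    have hpf : prodFact (h :: t) = Nat.factorial h * prodFact t := by
      simp [prodFact, List.map_cons, List.prod_cons]
    rw [hpf, Nat.factorization_mul (Nat.factorial_ne_zero h) (prodFact_pos t).ne']
    simp [Finsupp.add_apply, ih]

-- ---- the prime-power product equals the quotient ----

theorem prod_primes_eq (hs : List Nat) (K Q : Nat) (hQ : Q * prodFact hs = Nat.factorial K) :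
    (∏ q ∈ Finset.Ico 2 (K + 1),
        (if q.Prime then q ^ ((Nat.factorial K).factorization q - (prodFact hs).factorization q) else 1)) = Q := by
  have hKne : Nat.factorial K ≠ 0 := Nat.factorial_ne_zero K
  have hQne : Q ≠ 0 := by
    intro h; rw [h, zero_mul] at hQ; exact hKne hQ.symm
  have hdvd : prodFact hs ∣ Nat.factorial K := ⟨Q, by rw [← hQ]; ring⟩
  have hQdiv : Q = Nat.factorial K / prodFact hs := by
    rw [← hQ, Nat.mul_div_cancel _ (prodFact_pos hs)]
  have hfacQ : ∀ q, Q.factorization q = (Nat.factorial K).factorization q - (prodFact hs).factorization q := by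
    intro q
    rw [hQdiv, Nat.factorization_div hdvd]
    rfl
  have hterm : ∀ q ∈ Finset.Ico 2 (K + 1),
      (if q.Prime then q ^ ((Nat.factorial K).factorization q - (prodFact hs).factorization q) else 1)
        = (if q.Prime then q ^ Q.factorization q else 1) := by
    intro q _; rw [hfacQ]
  rw [Finset.prod_congr rfl hterm]
  have hsupp : Q.factorization.support ⊆ Finset.Ico 2 (K + 1) := by
    intro q hq
    rw [Nat.support_factorization] at hq
    have hqp : q.Prime := Nat.prime_of_mem_primeFactors hq
    have hqdvd : q ∣ Q := Nat.dvd_of_mem_primeFactors hq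
    have hqK : q ∣ Nat.factorial K := hqdvd.trans ⟨prodFact hs, hQ.symm ▸ rfl⟩
    have := (Nat.Prime.dvd_factorial hqp).mp hqK
    exact Finset.mem_Ico.mpr ⟨hqp.two_le, by omega⟩
  have hout : ∀ q ∈ Finset.Ico 2 (K + 1), q ∉ Q.factorization.support →
      (if q.Prime then q ^ Q.factorization q else 1) = 1 := by
    intro q _ hq
    rw [Finsupp.notMem_support_iff.mp hq]
    split_ifs <;> simp
  rw [← Finset.prod_subset hsupp hout]
  have hin : ∀ q ∈ Q.factorization.support, (if q.Prime then q ^ Q.factorization q else 1) = q ^ Q.factorization q := by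
    intro q hq
    rw [Nat.support_factorization] at hq
    rw [if_pos (Nat.prime_of_mem_primeFactors hq)]
  rw [Finset.prod_congr rfl hin]
  exact Nat.prod_factorization_pow_eq_self hQne

-- ---- loop-shape bridges for port B ----

theorem foldl_sub_sum (f : Int → Int) : ∀ (l : List Int) (init : Int),
    l.foldl (fun e h => e - f h) init = init - (l.map f).sum := by
  intro l
  induction l with
  | nil => intro init; simp
  | cons h t ih => intro init; rw [List.foldl_cons, ih]; simp [List.sum_cons]; ring

theorem foldl_mul_if (E : Int → Int) : ∀ (l : List Int) (init : Int),
    l.foldl (fun r p => if bIsPrime p then r * p ^ ((E p).toNat) else r) init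
      = init * (l.map (fun p => if bIsPrime p then p ^ ((E p).toNat) else 1)).prod := by
  intro l
  induction l with
  | nil => intro init; simp
  | cons h t ih =>
    intro init
    rw [List.foldl_cons, ih, List.map_cons, List.prod_cons]
    by_cases hb : bIsPrime h
    · rw [if_pos hb, if_pos hb]; ring
    · rw [if_neg hb, if_neg hb]; ring

theorem prod_map_pyRange_two (F : Int → Int) (G : Nat → Int)
    (hFG : ∀ q : Nat, 2 ≤ q → F ((q : Nat) : Int) = G q) :
    ∀ K : Nat, ((PySem.List.pyRange 2 ((K : Int) + 1) 1).map F).prod = ∏ q ∈ Finset.Ico 2 (K + 1), G q := by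
  intro K
  induction K with
  | zero =>
    rw [PySem.List.pyRange_one_eq_nil (by norm_num)]
    simp
  | succ K ih =>
    by_cases hK : 1 ≤ K
    · have hsplit : PySem.List.pyRange 2 (((K + 1 : Nat) : Int) + 1) 1
          = PySem.List.pyRange 2 ((K : Int) + 1) 1 ++ [((K : Int) + 1)] := by
        have : (((K + 1 : Nat) : Int) + 1) = ((K : Int) + 1) + 1 := by push_cast; ring
        rw [this, PySem.List.pyRange_one_succ_right (by push_cast; omega)]
      have hlast : F ((K : Int) + 1) = G (K + 1) := by
        have h1 : ((K : Int) + 1) = (((K + 1 : Nat)) : Int) := by push_cast; ring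
        rw [h1, hFG (K + 1) (by omega)]
      rw [hsplit, List.map_append, List.prod_append, ih, List.map_singleton,
          List.prod_singleton, hlast]
      conv_rhs => rw [Finset.prod_Ico_succ_top (show 2 ≤ K + 1 by omega) G]
    · have hK0 : K = 0 := by omega
      subst hK0
      rw [show (((1 : Nat) : Int) + 1) = (2 : Int) by norm_num, PySem.List.pyRange_one_eq_nil le_rfl]
      simp

theorem cast_list_sum (hs : List Nat) (f : Nat → Nat) :
    (hs.map (fun h => ((f h : Nat) : Int))).sum = (((hs.map f).sum : Nat) : Int) := by
  induction hs with
  | nil => simp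
  | cons h t ih => simp [List.sum_cons, ih]

-- ---- the common core, over the list of counts ----

-- number of odd values
def cntOdd (vs : List Int) : Nat := vs.countP (fun c => decide (PySem.Int.mod c 2 ≠ 0))

theorem mod_two_mem (c : Int) : PySem.Int.mod c 2 = 0 ∨ PySem.Int.mod c 2 = 1 := by
  rw [PySem.Int.mod_eq_emod_of_pos (by norm_num)]
  omega

theorem aOddLoop_eq : ∀ (vs : List Int) (odd : Int), odd = 0 ∨ odd = 1 →
    aOddLoop vs odd = if 1 < odd + cntOdd vs then some 0 else none := by
  intro vs
  induction vs with
  | nil =>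
    intro odd hodd
    have : ¬ (1 < odd + (cntOdd [] : Int)) := by simp only [cntOdd, List.countP_nil]; omega
    rw [aOddLoop, if_neg this]
  | cons c rest ih =>
    intro odd hodd
    rcases mod_two_mem c with h | h
    · have hdvd : (2 : Int) ∣ c := by
        rw [PySem.Int.mod_eq_emod_of_pos (by norm_num)] at h; omega
      have hc : ¬ (PySem.Int.mod c 2 ≠ 0) := fun hn => hn h
      have hcnt : cntOdd (c :: rest) = cntOdd rest := by
        simp [cntOdd, List.countP_cons, hdvd]
      rw [aOddLoop, if_neg hc, ih odd hodd, hcnt]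
    · have hm : c % 2 = 1 := by
        rw [PySem.Int.mod_eq_emod_of_pos (by norm_num)] at h; exact h
      have hc : PySem.Int.mod c 2 ≠ 0 := by rw [h]; norm_num
      have hcnt : cntOdd (c :: rest) = cntOdd rest + 1 := by
        simp [cntOdd, List.countP_cons, hm]
      rcases hodd with rfl | rfl
      · have h1 : ¬ ((0 : Int) + 1 > 1) := by omega
        rw [aOddLoop, if_pos hc, if_neg h1, ih (0 + 1) (Or.inr (by norm_num))]
        by_cases h2 : (1 : Int) < 0 + 1 + (cntOdd rest : Int)
        · rw [if_pos h2, if_pos (by rw [hcnt]; push_cast; push_cast at h2; omega)]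
        · rw [if_neg h2, if_neg (by rw [hcnt]; push_cast; push_cast at h2; omega)]
      · have h1 : ((1 : Int) + 1 > 1) := by omega
        have hgt : (1 : Int) < 1 + (cntOdd (c :: rest) : Int) := by rw [hcnt]; push_cast; omega
        rw [aOddLoop, if_pos hc, if_pos h1, if_pos hgt]

theorem sum_mods_eq_cntOdd (vs : List Int) :
    (vs.map (fun c => PySem.Int.mod c 2)).sum = (cntOdd vs : Int) := by
  induction vs with
  | nil => simp [cntOdd]
  | cons c rest ih =>
    rcases mod_two_mem c with h | h
    · have hdvd : (2 : Int) ∣ c := by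
        rw [PySem.Int.mod_eq_emod_of_pos (by norm_num)] at h; omega
      have hcnt : cntOdd (c :: rest) = cntOdd rest := by
        simp [cntOdd, List.countP_cons, hdvd]
      rw [List.map_cons, List.sum_cons, h, hcnt, ih]
      ring
    · have hm : c % 2 = 1 := by
        rw [PySem.Int.mod_eq_emod_of_pos (by norm_num)] at h; exact h
      have hcnt : cntOdd (c :: rest) = cntOdd rest + 1 := by
        simp [cntOdd, List.countP_cons, hm]
      rw [List.map_cons, List.sum_cons, h, hcnt, ih]
      push_cast
      ring

-- ---- A's decrement pass at the dict level ----

theorem decpass_untouch : ∀ (K : List Char) (d : PySem.Dict Char Int) (k : Char), k ∉ K →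
    (K.foldl (fun d ch => if PySem.Int.mod (d.getD ch 0) 2 ≠ 0 then d.modify ch 0 (fun v => v - 1) else d) d).getD k 0
      = d.getD k 0 := by
  intro K
  induction K with
  | nil => intro d k _; rfl
  | cons a K' ih =>
    intro d k hk
    have hka : k ≠ a := by simp only [List.mem_cons, not_or] at hk; exact hk.1
    have hk' : k ∉ K' := by simp only [List.mem_cons, not_or] at hk; exact hk.2
    rw [List.foldl_cons, ih _ _ hk']
    by_cases hmod : PySem.Int.mod (d.getD a 0) 2 ≠ 0
    · rw [if_pos hmod, PySem.Dict.getD_modify_of_ne d 0 (fun v => v - 1) hka]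
    · rw [if_neg hmod]

theorem decpass_keys : ∀ (K : List Char) (d : PySem.Dict Char Int), (∀ a ∈ K, d.contains a = true) →
    (K.foldl (fun d ch => if PySem.Int.mod (d.getD ch 0) 2 ≠ 0 then d.modify ch 0 (fun v => v - 1) else d) d).keys
      = d.keys := by
  intro K
  induction K with
  | nil => intro d _; rfl
  | cons a K' ih =>
    intro d hd
    have hstep_keys : (if PySem.Int.mod (d.getD a 0) 2 ≠ 0 then d.modify a 0 (fun v => v - 1) else d).keys = d.keys := by
      by_cases hmod : PySem.Int.mod (d.getD a 0) 2 ≠ 0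
      · rw [if_pos hmod, PySem.Dict.keys_modify,
            PySem.Dict.keys_insert_of_contains d _ (hd a (List.mem_cons_self))]
      · rw [if_neg hmod]
    have hcont : ∀ b ∈ K', (if PySem.Int.mod (d.getD a 0) 2 ≠ 0 then d.modify a 0 (fun v => v - 1) else d).contains b = true := by
      intro b hb
      by_cases hmod : PySem.Int.mod (d.getD a 0) 2 ≠ 0
      · rw [if_pos hmod, PySem.Dict.contains_modify, hd b (List.mem_cons_of_mem _ hb)]
        simp
      · rw [if_neg hmod]; exact hd b (List.mem_cons_of_mem _ hb)
    rw [List.foldl_cons, ih _ hcont, hstep_keys]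

theorem decpass_at : ∀ (K : List Char) (d : PySem.Dict Char Int) (k : Char), K.Nodup → k ∈ K →
    (K.foldl (fun d ch => if PySem.Int.mod (d.getD ch 0) 2 ≠ 0 then d.modify ch 0 (fun v => v - 1) else d) d).getD k 0
      = (if PySem.Int.mod (d.getD k 0) 2 ≠ 0 then d.getD k 0 - 1 else d.getD k 0) := by
  intro K
  induction K with
  | nil => intro d k _ hk; exact absurd hk (List.not_mem_nil)
  | cons a K' ih =>
    intro d k hnd hk
    rcases List.mem_cons.mp hk with rfl | hk'
    · have ha : k ∉ K' := (List.nodup_cons.mp hnd).1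
      rw [List.foldl_cons, decpass_untouch K' _ k ha]
      by_cases hmod : PySem.Int.mod (d.getD k 0) 2 ≠ 0
      · rw [if_pos hmod, if_pos hmod, PySem.Dict.getD_modify_self]
      · rw [if_neg hmod, if_neg hmod]
    · have hka : k ≠ a := by
        rintro rfl; exact (List.nodup_cons.mp hnd).1 hk'
      have hstep : (if PySem.Int.mod (d.getD a 0) 2 ≠ 0 then d.modify a 0 (fun v => v - 1) else d).getD k 0 = d.getD k 0 := by
        by_cases hmod : PySem.Int.mod (d.getD a 0) 2 ≠ 0
        · rw [if_pos hmod, PySem.Dict.getD_modify_of_ne d 0 (fun v => v - 1) hka]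
        · rw [if_neg hmod]
      rw [List.foldl_cons, ih _ k (List.nodup_cons.mp hnd).2 hk', hstep]

-- the decrement pass leaves the keys unchanged and rewrites each value v to (if odd v then v-1 else v)
theorem decpass_values (xs : List Char) :
    ((PySem.Dict.counter xs).keys.foldl
      (fun d ch => if PySem.Int.mod (d.getD ch 0) 2 ≠ 0 then d.modify ch 0 (fun v => v - 1) else d)
      (PySem.Dict.counter xs)).values
    = (PySem.Dict.counter xs).values.map (fun v => if PySem.Int.mod v 2 ≠ 0 then v - 1 else v) := by
  have hnd := PySem.Dict.nodup_keys_counter xs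
  have hcont : ∀ a ∈ (PySem.Dict.counter xs).keys, (PySem.Dict.counter xs).contains a = true := by
    intro a ha
    rw [PySem.Dict.contains_counter]
    rw [PySem.Dict.keys_counter, PySem.Set.mem_ofList] at ha
    simpa using ha
  have hkeys := decpass_keys (PySem.Dict.counter xs).keys (PySem.Dict.counter xs) hcont
  rw [PySem.Dict.values_eq_map_keys _ (by rw [hkeys]; exact hnd) 0, hkeys,
      PySem.Dict.values_eq_map_keys _ hnd 0, List.map_map]
  refine List.map_congr_left ?_
  intro k hkmem
  exact decpass_at _ _ k hnd hkmem

-- ---- counter facts ----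

theorem counter_values_eq (xs : List Char) :
    (PySem.Dict.counter xs).values
      = ((PySem.Set.ofList xs).map (fun k => List.count k xs)).map (fun (n : Nat) => (n : Int)) := by
  show ((PySem.Dict.counter xs).items.map (fun p => p.2)) = _
  rw [PySem.Dict.items_counter, List.map_map, List.map_map]
  rfl

theorem sum_map_add (K : List Char) (f g : Char → Nat) :
    (K.map (fun k => f k + g k)).sum = (K.map f).sum + (K.map g).sum := by
  induction K with
  | nil => simp
  | cons a K' ih => simp [List.sum_cons, ih]; ring

theorem sum_indicator (x : Char) : ∀ (K : List Char), K.Nodup →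
    (K.map (fun k => if x == k then (1 : Nat) else 0)).sum = if x ∈ K then 1 else 0 := by
  intro K
  induction K with
  | nil => simp
  | cons a K' ih =>
    intro hnd
    obtain ⟨ha, hnd'⟩ := List.nodup_cons.mp hnd
    rw [List.map_cons, List.sum_cons, ih hnd']
    by_cases hax : x = a
    · subst hax
      have h2 : x ∉ K' := ha
      simp [h2]
    · have h1 : (x == a) = false := by simp [hax]
      rw [h1]
      simp only [List.mem_cons]
      by_cases hx : x ∈ K'
      · simp [hx, hax]
      · simp [hx, hax]

theorem sum_counts_gen : ∀ (xs : List Char) (K : List Char), K.Nodup → (∀ x ∈ xs, x ∈ K) →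
    (K.map (fun k => List.count k xs)).sum = xs.length := by
  intro xs
  induction xs with
  | nil => intro K _ _; simp
  | cons x t ih =>
    intro K hnd hsub
    have h1 : K.map (fun k => List.count k (x :: t))
        = K.map (fun k => List.count k t + if x == k then 1 else 0) := by
      refine List.map_congr_left ?_
      intro k _
      rw [List.count_cons]
    rw [h1, sum_map_add, ih K hnd (fun y hy => hsub y (List.mem_cons_of_mem _ hy)),
        sum_indicator x K hnd, if_pos (hsub x List.mem_cons_self)]
    simp

theorem sum_counts (xs : List Char) :
    ((PySem.Set.ofList xs).map (fun k => List.count k xs)).sum = xs.length := by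
  exact sum_counts_gen xs _ (PySem.Set.nodup_ofList xs) (fun x hx => (PySem.Set.mem_ofList xs x).mpr hx)

-- ---- Int/Nat bridges for port A's fold ----

theorem afold_int : ∀ (hn : List Nat) (m : Nat),
    (hn.map (fun (n : Nat) => (n : Int))).foldl
        (fun p c => PySem.Int.floordiv p (pyFactorial (PySem.Int.floordiv c 2))) (m : Int)
      = ((hn.foldl (fun p h => p / (h / 2).factorial) m : Nat) : Int) := by
  intro hn
  induction hn with
  | nil => intro m; rfl
  | cons h t ih =>
    intro m
    rw [List.map_cons, List.foldl_cons, List.foldl_cons]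
    have h1 : PySem.Int.floordiv (h : Int) 2 = ((h / 2 : Nat) : Int) := by
      exact_mod_cast PySem.Int.floordiv_natCast h 2
    have h2 : pyFactorial (Nat.cast (h / 2) : Int) = (((h / 2).factorial : Nat) : Int) := by
      simp only [pyFactorial, Int.toNat_natCast]
    rw [h1, h2, PySem.Int.floordiv_natCast m (h / 2).factorial, ih]

theorem cntOdd_cons (c : Int) (l : List Int) :
    cntOdd (c :: l) = cntOdd l + (if PySem.Int.mod c 2 ≠ 0 then 1 else 0) := by
  simp only [cntOdd, List.countP_cons, decide_eq_true_eq]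

theorem cntOdd_map_cast : ∀ (nc : List Nat),
    cntOdd (nc.map (fun (n : Nat) => (n : Int))) = (nc.map (fun n => n % 2)).sum := by
  intro nc
  induction nc with
  | nil => rfl
  | cons n t ih =>
    have hm : PySem.Int.mod ((n : Nat) : Int) 2 = ((n % 2 : Nat) : Int) := by
      exact_mod_cast PySem.Int.mod_natCast n 2
    rw [List.map_cons, cntOdd_cons, ih, List.map_cons, List.sum_cons]
    rcases Nat.mod_two_eq_zero_or_one n with h | h
    · have hc : ¬ (PySem.Int.mod ((n : Nat) : Int) 2 ≠ 0) := by rw [hm, h]; simp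
      rw [if_neg hc, h]
      omega
    · have hc : PySem.Int.mod ((n : Nat) : Int) 2 ≠ 0 := by rw [hm, h]; norm_num
      rw [if_pos hc, h]
      omega

theorem decmap_cast (nc : List Nat) :
    (nc.map (fun (n : Nat) => (n : Int))).map (fun v => if PySem.Int.mod v 2 ≠ 0 then v - 1 else v)
      = (nc.map (fun n => n - n % 2)).map (fun (n : Nat) => (n : Int)) := by
  rw [List.map_map, List.map_map]
  refine List.map_congr_left ?_
  intro n _
  have hm : PySem.Int.mod ((n : Nat) : Int) 2 = ((n % 2 : Nat) : Int) := by
    exact_mod_cast PySem.Int.mod_natCast n 2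
  rcases Nat.mod_two_eq_zero_or_one n with h | h
  · have hc : ¬ (PySem.Int.mod ((n : Nat) : Int) 2 ≠ 0) := by rw [hm, h]; simp
    simp only [Function.comp_apply, if_neg hc, h]
    omega
  · have hc : PySem.Int.mod ((n : Nat) : Int) 2 ≠ 0 := by rw [hm, h]; norm_num
    simp only [Function.comp_apply, if_pos hc, h]
    omega

-- halves of the counts list, as Ints
theorem halves_cast (nc : List Nat) :
    (nc.map (fun (n : Nat) => (n : Int))).map (fun c => PySem.Int.floordiv c 2)
      = (nc.map (fun n => n / 2)).map (fun (n : Nat) => (n : Int)) := by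
  rw [List.map_map, List.map_map]
  refine List.map_congr_left ?_
  intro n _
  simpa using (PySem.Int.floordiv_natCast n 2)

-- ---- the Nat-level core: A's division fold equals B's prime-power product ----

theorem nat_core (nc : List Nat) (L : Nat) (hsum : nc.sum = L) :
    (∏ q ∈ Finset.Ico 2 (L / 2 + 1),
        (if q.Prime then q ^ ((Nat.factorial (L / 2)).factorization q
            - (prodFact (nc.map (fun n => n / 2))).factorization q) else 1))
      = (nc.map (fun n => n - n % 2)).foldl (fun p h => p / (h / 2).factorial) (Nat.factorial (L / 2)) := by
  have hfun : (nc.map (fun n => n - n % 2)).foldl (fun p h => p / (h / 2).factorial) (Nat.factorial (L / 2))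
      = (nc.map (fun n => n / 2)).foldl (fun p h => p / h.factorial) (Nat.factorial (L / 2)) := by
    rw [List.foldl_map, List.foldl_map]
    have he : (fun (p : Nat) (n : Nat) => p / ((n - n % 2) / 2).factorial)
        = (fun (p : Nat) (n : Nat) => p / (n / 2).factorial) := by
      funext p n
      have h2 : (n - n % 2) / 2 = n / 2 := by omega
      rw [h2]
    rw [he]
  have hsum2 := sum_halves nc
  have hK : (nc.map (fun n => n / 2)).sum ≤ L / 2 := by omega
  have hA := afold_mul_prodFact (nc.map (fun n => n / 2)) 1 (L / 2) hK
  simp only [one_mul] at hA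
  rw [hfun]
  exact prod_primes_eq (nc.map (fun n => n / 2)) (L / 2) _ hA

-- ===== VERDICT (by name: the statement is the Claim_ definition above) =====
theorem count_palindromic_anagrams_spec : Claim_equal_count_palindromic_anagrams := by
  intro s _
  unfold Spec_count_palindromic_anagrams
  simp only [count_palindromic_anagrams, count_palindromic_anagrams_alt]
  rw [counter_values_eq s.toList]
  rw [aOddLoop_eq _ 0 (Or.inl rfl), sum_mods_eq_cntOdd, cntOdd_map_cast]
  set nc : List Nat := (PySem.Set.ofList s.toList).map (fun k => List.count k s.toList) with hnc
  set od := (nc.map (fun n => n % 2)).sum with hodd_def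
  by_cases hodd : (1 : Int) < 0 + (od : Int)
  · rw [if_pos hodd, if_pos (show ((od : Nat) : Int) > 1 by push_cast at hodd ⊢; omega)]
  · rw [if_neg hodd, if_neg (show ¬ (((od : Nat) : Int) > 1) by push_cast at hodd ⊢; omega)]
    rw [decpass_values s.toList, counter_values_eq s.toList, decmap_cast, halves_cast]
    set L := s.toList.length with hL
    set K := L / 2 with hKdef
    set hs : List Nat := nc.map (fun n => n / 2) with hhs
    have hlen : PySem.Int.floordiv (PySem.Str.len s) 2 = ((K : Nat) : Int) := by
      rw [PySem.Str.len_eq, hKdef, hL]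
      exact_mod_cast PySem.Int.floordiv_natCast s.toList.length 2
    have hperm : pyFactorial ((K : Nat) : Int) = ((Nat.factorial K : Nat) : Int) := by
      simp only [pyFactorial, Int.toNat_natCast]
    rw [hlen, hperm, afold_int (nc.map (fun n => n - n % 2)) (Nat.factorial K)]
    -- divisibility: prodFact hs ∣ K!
    have hsumK : hs.sum ≤ K := by
      have := sum_halves nc
      have hncs : nc.sum = L := by rw [hnc, hL]; exact sum_counts s.toList
      rw [hhs, hKdef]; omega
    have hAfold := afold_mul_prodFact hs 1 K hsumK
    simp only [one_mul] at hAfold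
    have hdvd : prodFact hs ∣ Nat.factorial K := by
      refine ⟨hs.foldl (fun p h => p / h.factorial) (Nat.factorial K), ?_⟩
      rw [mul_comm] at hAfold
      exact hAfold.symm
    have hfacle : ∀ q : Nat, (prodFact hs).factorization q ≤ (Nat.factorial K).factorization q := by
      intro q
      have := (Nat.factorization_le_iff_dvd (prodFact_pos hs).ne' (Nat.factorial_ne_zero K)).mpr hdvd
      exact Finsupp.le_def.mp this q
    -- B's fold over the primes
    rw [foldl_mul_if
          (fun p => ((hs.map (fun (n : Nat) => (n : Int))).foldl (fun e h => e - bLegendre h p) (bLegendre ((K : Nat) : Int) p)))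
          (PySem.List.pyRange 2 (((K : Nat) : Int) + 1) 1) 1, one_mul]
    rw [prod_map_pyRange_two _
        (fun q => if q.Prime then ((q : Nat) : Int) ^ ((Nat.factorial K).factorization q - (prodFact hs).factorization q) else 1)
        ?hFG K]
    case hFG =>
      intro q hq2
      by_cases hqp : q.Prime
      · rw [if_pos ((bIsPrime_iff q hq2).mpr hqp)]
        simp only [hqp, if_true]
        congr 1
        -- the Legendre exponent
        rw [foldl_sub_sum]
        have hmapleg : (hs.map (fun (n : Nat) => (n : Int))).map (fun h => bLegendre h ((q : Nat) : Int))
            = hs.map (fun h => (((Nat.factorial h).factorization q : Nat) : Int)) := by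
          rw [List.map_map]
          refine List.map_congr_left ?_
          intro h _
          exact bLegendre_eq h q hqp
        rw [hmapleg, bLegendre_eq K q hqp, cast_list_sum hs (fun h => (Nat.factorial h).factorization q)]
        rw [← prodFact_factorization hs q]
        have hle := hfacle q
        omega
      · rw [if_neg (by rw [bIsPrime_iff q hq2]; exact hqp)]
        simp [hqp]
    -- move the Nat product through the cast
    have hcastprod : (∏ q ∈ Finset.Ico 2 (K + 1),
          (if q.Prime then ((q : Nat) : Int) ^ ((Nat.factorial K).factorization q - (prodFact hs).factorization q) else 1))
        = (((∏ q ∈ Finset.Ico 2 (K + 1),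
          (if q.Prime then q ^ ((Nat.factorial K).factorization q - (prodFact hs).factorization q) else 1)) : Nat) : Int) := by
      rw [Nat.cast_prod]
      refine Finset.prod_congr rfl ?_
      intro q _
      split_ifs <;> push_cast <;> ring
    rw [hcastprod]
    exact congrArg (fun (n : Nat) => (n : Int)) (nat_core nc L (by rw [hnc, hL]; exact sum_counts s.toList)).symm ▸ rfl
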